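-- pv_equiv track=rewrite | github.com/josephbakarji/deep-delay-autoencoder | aesindy/sindy_utils.py | sindy_library_names
-- ===== SOURCE A (Python) =====
-- def sindy_library_names(latent_dim, poly_order, include_sine=False, exact_features=False):
--     # Upgrade to combinations
--     symbs = ['x', 'y', 'z', '4', '5', '6', '7']
--
--     if exact_features:
--         return ['x', 'y', 'z', 'xy', 'xz']
--
--     n = latent_dim
--     index = 1
--     names = ['1']
--
--     for i in range(n):
--         names.append(symbs[i])
--         index += 1
--
--     if poly_order > 1:
--         for i in range(n):
--             for j in range(i,n):
--                 names.append(symbs[i]+symbs[j])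
--                 index += 1
--
--     if poly_order > 2:
--         for i in range(n):
--             for j in range(i,n):
--                 for k in range(j,n):
--                     names.append(symbs[i]+symbs[j]+symbs[k])
--                     index += 1
--
--     if poly_order > 3:
--         for i in range(n):
--             for j in range(i,n):
--                 for k in range(j,n):
--                     for q in range(k,n):
--                         names.append(symbs[i]+symbs[j]+symbs[k]+symbs[q])
--                         index += 1
--
--     if poly_order > 4:
--         for i in range(n):
--             for j in range(i,n):
--                 for k in range(j,n):
--                     for q in range(k,n):
--                         for r in range(q,n):
--                             names.append(symbs[i]+symbs[j]+symbs[k]+symbs[q]+symbs[r])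
--                             index += 1
--
--     if include_sine:
--         for i in range(n):
--             names.append('sin('+symbs[i]+')')
--             index += 1
--
--     return names
-- ===== SOURCE B (Python) =====
-- def _append_combos(symbs, n, d, start, prefix, out):
--     # depth-first enumeration of non-decreasing index tuples of length d
--     if d == 0:
--         out.append(prefix)
--         return
--     for i in range(start, n):
--         _append_combos(symbs, n, d - 1, i, prefix + symbs[i], out)
--
--
-- def sindy_library_names(latent_dim, poly_order, include_sine=False, exact_features=False):
--     symbs = ['x', 'y', 'z', '4', '5', '6', '7']
--     if exact_features:
--         return ['x', 'y', 'z', 'xy', 'xz']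
--     names = ['1']
--     for d in range(1, 6):
--         if d == 1 or poly_order >= d:
--             _append_combos(symbs, latent_dim, d, 0, '', names)
--     if include_sine:
--         for i in range(latent_dim):
--             names.append('sin(' + symbs[i] + ')')
--     return names
-- ===== Notes on version B (the rewrite author's own statement) =====
-- stated objective: simpler
-- what changed: Replaces the five hand-unrolled nested loop blocks (one per polynomial degree) with a single recursive depth-first enumeration of non-decreasing index tuples, parametrized by the degree d = 1..5.
import Mathlib
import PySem

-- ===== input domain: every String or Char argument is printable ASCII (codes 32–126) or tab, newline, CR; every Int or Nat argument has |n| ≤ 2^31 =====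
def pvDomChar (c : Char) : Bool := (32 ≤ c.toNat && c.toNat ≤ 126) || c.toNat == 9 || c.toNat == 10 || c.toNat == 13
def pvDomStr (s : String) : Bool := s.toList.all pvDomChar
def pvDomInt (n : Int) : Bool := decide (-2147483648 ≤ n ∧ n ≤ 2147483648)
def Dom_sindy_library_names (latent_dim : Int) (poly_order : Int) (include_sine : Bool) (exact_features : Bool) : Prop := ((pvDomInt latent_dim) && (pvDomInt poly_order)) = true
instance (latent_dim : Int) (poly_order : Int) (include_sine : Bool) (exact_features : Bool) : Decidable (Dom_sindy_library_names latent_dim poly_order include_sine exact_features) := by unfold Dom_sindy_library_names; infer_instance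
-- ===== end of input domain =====

-- B replaces A's five hand-unrolled nested loop blocks with one recursive degree-parametrized
-- enumeration of non-decreasing index tuples (objective: simpler); same return value on Pre_.

-- ===== PORT A =====
def sindy_library_names (latent_dim : Int) (poly_order : Int) (include_sine : Bool) (exact_features : Bool) : List String :=
  let symbs : List String := ["x", "y", "z", "4", "5", "6", "7"]
  if exact_features then ["x", "y", "z", "xy", "xz"]
  else
    let n := latent_dim
    let names : List String := ["1"]
    let names := (PySem.List.pyRange 0 n 1).foldl
      (fun names i => names ++ [PySem.List.pyGetD symbs i ""]) names
    let names := if 1 < poly_order then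
        (PySem.List.pyRange 0 n 1).foldl (fun names i =>
          (PySem.List.pyRange i n 1).foldl (fun names j =>
            names ++ [PySem.List.pyGetD symbs i "" ++ PySem.List.pyGetD symbs j ""]) names) names
      else names
    let names := if 2 < poly_order then
        (PySem.List.pyRange 0 n 1).foldl (fun names i =>
          (PySem.List.pyRange i n 1).foldl (fun names j =>
            (PySem.List.pyRange j n 1).foldl (fun names k =>
              names ++ [PySem.List.pyGetD symbs i "" ++ PySem.List.pyGetD symbs j "" ++
                PySem.List.pyGetD symbs k ""]) names) names) names
      else names
    let names := if 3 < poly_order then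
        (PySem.List.pyRange 0 n 1).foldl (fun names i =>
          (PySem.List.pyRange i n 1).foldl (fun names j =>
            (PySem.List.pyRange j n 1).foldl (fun names k =>
              (PySem.List.pyRange k n 1).foldl (fun names q =>
                names ++ [PySem.List.pyGetD symbs i "" ++ PySem.List.pyGetD symbs j "" ++
                  PySem.List.pyGetD symbs k "" ++ PySem.List.pyGetD symbs q ""]) names) names) names) names
      else names
    let names := if 4 < poly_order then
        (PySem.List.pyRange 0 n 1).foldl (fun names i =>
          (PySem.List.pyRange i n 1).foldl (fun names j =>
            (PySem.List.pyRange j n 1).foldl (fun names k =>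
              (PySem.List.pyRange k n 1).foldl (fun names q =>
                (PySem.List.pyRange q n 1).foldl (fun names r =>
                  names ++ [PySem.List.pyGetD symbs i "" ++ PySem.List.pyGetD symbs j "" ++
                    PySem.List.pyGetD symbs k "" ++ PySem.List.pyGetD symbs q "" ++
                    PySem.List.pyGetD symbs r ""]) names) names) names) names) names
      else names
    let names := if include_sine then
        (PySem.List.pyRange 0 n 1).foldl
          (fun names i => names ++ ["sin(" ++ PySem.List.pyGetD symbs i "" ++ ")"]) names
      else names
    names

-- ===== PORT B =====
-- helper _append_combos of Source B: returns the strings it appends (pre for d = 0,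
-- otherwise recurse over i in range(start, n) with degree d-1 and pre + symbs[i])
def pvCombos (symbs : List String) (n : Int) : Nat → Int → String → List String
  | 0, _start, pre => [pre]
  | d + 1, start, pre =>
      (PySem.List.pyRange start n 1).foldl
        (fun out i => out ++ pvCombos symbs n d i (pre ++ PySem.List.pyGetD symbs i "")) []

def sindy_library_names_alt (latent_dim : Int) (poly_order : Int) (include_sine : Bool) (exact_features : Bool) : List String :=
  let symbs : List String := ["x", "y", "z", "4", "5", "6", "7"]
  if exact_features then ["x", "y", "z", "xy", "xz"]
  else
    let names : List String := ["1"]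
    let names := (PySem.List.pyRange 1 6 1).foldl
      (fun names d =>
        if d = 1 ∨ d ≤ poly_order then names ++ pvCombos symbs latent_dim d.toNat 0 "" else names)
      names
    let names := if include_sine then
        (PySem.List.pyRange 0 latent_dim 1).foldl
          (fun names i => names ++ ["sin(" ++ PySem.List.pyGetD symbs i "" ++ ")"]) names
      else names
    names

-- ===== PRECONDITION & SPEC =====
-- Pre_ excludes exactly the inputs on which the Python A raises IndexError
-- (latent_dim > 7 with exact_features false); B raises there too.
def Pre_sindy_library_names (latent_dim : Int) (poly_order : Int) (include_sine : Bool) (exact_features : Bool) : Prop :=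
  exact_features = true ∨ latent_dim ≤ 7
instance (latent_dim : Int) (poly_order : Int) (include_sine : Bool) (exact_features : Bool) : Decidable (Pre_sindy_library_names latent_dim poly_order include_sine exact_features) := by unfold Pre_sindy_library_names; infer_instance

def pvWitness_sindy_library_names : Int × Int × Bool × Bool := (3, 2, true, false)

def Spec_sindy_library_names (latent_dim : Int) (poly_order : Int) (include_sine : Bool) (exact_features : Bool) (out : List String) : Prop := out = sindy_library_names_alt latent_dim poly_order include_sine exact_features
instance (latent_dim : Int) (poly_order : Int) (include_sine : Bool) (exact_features : Bool) (out : List String) : Decidable (Spec_sindy_library_names latent_dim poly_order include_sine exact_features out) := by unfold Spec_sindy_library_names; infer_instance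

-- ===== CLAIM (what is proved, stated in full; the proofs are below) =====
def Claim_equal_sindy_library_names : Prop := ∀ (latent_dim : Int) (poly_order : Int) (include_sine : Bool) (exact_features : Bool), Dom_sindy_library_names latent_dim poly_order include_sine exact_features → Pre_sindy_library_names latent_dim poly_order include_sine exact_features → Spec_sindy_library_names latent_dim poly_order include_sine exact_features (sindy_library_names latent_dim poly_order include_sine exact_features)

-- ===== LEMMAS AND PROOFS =====

lemma pvCombos_zero (sy : List String) (n st : Int) (pre : String) :
    pvCombos sy n 0 st pre = [pre] := rfl

lemma pvCombos_succ (sy : List String) (n : Int) (d : Nat) (st : Int) (pre : String) :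
    pvCombos sy n (d + 1) st pre =
      (PySem.List.pyRange st n 1).flatMap
        (fun i => pvCombos sy n d i (pre ++ PySem.List.pyGetD sy i "")) := by
  conv_lhs => rw [pvCombos]
  rw [PySem.List.foldl_append_eq_flatMap, List.nil_append]

lemma AB_eq (n p : Int) (s : Bool) :
    sindy_library_names n p s false = sindy_library_names_alt n p s false := by
  have hr : PySem.List.pyRange 1 6 1 = [1, 2, 3, 4, 5] := by decide
  simp only [sindy_library_names, sindy_library_names_alt, hr, List.foldl,
    true_or, if_true, false_or,
    show ¬((2 : Int) = 1) from by decide,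
    show ¬((3 : Int) = 1) from by decide,
    show ¬((4 : Int) = 1) from by decide,
    show ¬((5 : Int) = 1) from by decide,
    show ((2 : Int) ≤ p) ↔ 1 < p from by omega,
    show ((3 : Int) ≤ p) ↔ 2 < p from by omega,
    show ((4 : Int) ≤ p) ↔ 3 < p from by omega,
    show ((5 : Int) ≤ p) ↔ 4 < p from by omega, show (1 : Int).toNat = 1 from rfl, show (2 : Int).toNat = 2 from rfl,
    show (3 : Int).toNat = 3 from rfl, show (4 : Int).toNat = 4 from rfl,
    show (5 : Int).toNat = 5 from rfl,
    pvCombos_succ, pvCombos_zero, PySem.List.foldl_append_eq_flatMap,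
    Bool.false_eq_true, if_false, String.empty_append, String.append_assoc,
    List.append_assoc]

-- ===== VERDICT (by name: the statement is the Claim_ definition above) =====
theorem sindy_library_names_spec : Claim_equal_sindy_library_names := by
  intro n p s e _hdom _hpre
  unfold Spec_sindy_library_names
  cases e with
  | true => simp [sindy_library_names, sindy_library_names_alt]
  | false => exact AB_eq n p s
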